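-- pv_equiv track=rewrite | github.com/aschaefer03/ai50 | week3/crossword/generate.py | lowest_vals
-- ===== SOURCE A (Python) =====
-- def lowest_vals(tuples):
--     choices = []
--     t_min = float('inf')
--     for t in tuples:
--         if t[1] < t_min:
--             choices = [t[0]]
--             t_min = t[1]
--         elif t[1] == t_min:
--             choices.append(t[0])
--     return choices
-- ===== SOURCE B (Python) =====
-- def lowest_vals(tuples):
--     if not tuples:
--         return []
--     m = min(t[1] for t in tuples)
--     return [t[0] for t in tuples if t[1] == m]
-- ===== Notes on version B (the rewrite author's own statement) =====
-- stated objective: simpler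
-- what changed: Replaces the fused running-minimum loop that rebuilds/extends the accumulator with a two-pass min-then-filter decomposition (compute the minimum second component, then collect firsts equal to it).
import Mathlib
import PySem

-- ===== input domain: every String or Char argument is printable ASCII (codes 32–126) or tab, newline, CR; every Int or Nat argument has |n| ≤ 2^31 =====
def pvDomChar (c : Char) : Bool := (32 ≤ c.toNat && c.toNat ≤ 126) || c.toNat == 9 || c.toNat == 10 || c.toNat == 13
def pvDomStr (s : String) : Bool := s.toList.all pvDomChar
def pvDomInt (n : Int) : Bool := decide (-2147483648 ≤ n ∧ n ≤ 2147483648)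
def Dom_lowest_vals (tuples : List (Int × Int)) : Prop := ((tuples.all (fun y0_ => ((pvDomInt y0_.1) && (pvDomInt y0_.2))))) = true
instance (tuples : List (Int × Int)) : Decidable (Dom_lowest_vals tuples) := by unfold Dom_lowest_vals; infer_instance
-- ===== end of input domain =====

-- B replaces A's fused running-minimum loop by a two-pass min-then-filter decomposition (objective: simpler).

-- ===== PORT A =====
-- A's loop state: choices, and t_min where `none` models float('inf') (every int is below it).
def lowest_vals_loop (ts : List (Int × Int)) (choices : List Int) (t_min : Option Int) : List Int :=
  match ts with
  | [] => choices
  | t :: rest =>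
    match t_min with
    | none => lowest_vals_loop rest [t.1] (some t.2)
    | some m =>
      if t.2 < m then lowest_vals_loop rest [t.1] (some t.2)
      else if t.2 = m then lowest_vals_loop rest (choices ++ [t.1]) (some m)
      else lowest_vals_loop rest choices (some m)

def lowest_vals (tuples : List (Int × Int)) : List Int :=
  lowest_vals_loop tuples [] none

-- ===== PORT B =====
def lowest_vals_alt (tuples : List (Int × Int)) : List Int :=
  match tuples with
  | [] => []
  | _ =>
    match PySem.List.min? (tuples.map Prod.snd) (fun x => x) with
    | none => []
    | some m => (tuples.filter (fun t => t.2 = m)).map Prod.fst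

-- ===== PRECONDITION & SPEC =====
def Spec_lowest_vals (tuples : List (Int × Int)) (out : List Int) : Prop := out = lowest_vals_alt tuples
instance (tuples : List (Int × Int)) (out : List Int) : Decidable (Spec_lowest_vals tuples out) := by unfold Spec_lowest_vals; infer_instance

-- ===== CLAIM (what is proved, stated in full; the proofs are below) =====
def Claim_equal_lowest_vals : Prop := ∀ (tuples : List (Int × Int)), Dom_lowest_vals tuples → Spec_lowest_vals tuples (lowest_vals tuples)

-- ===== LEMMAS AND PROOFS =====

-- running minimum of the seconds, seeded with m
def pvFoldMin (m : Int) (ts : List (Int × Int)) : Int :=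
  ts.foldl (fun a t => min a t.2) m

theorem pvFoldMin_le (m : Int) (ts : List (Int × Int)) : pvFoldMin m ts ≤ m := by
  induction ts generalizing m with
  | nil => simp [pvFoldMin]
  | cons t rest ih =>
    calc pvFoldMin m (t :: rest) = pvFoldMin (min m t.2) rest := rfl
    _ ≤ min m t.2 := ih _
    _ ≤ m := min_le_left _ _

theorem lowest_vals_loop_char (ts : List (Int × Int)) (acc : List Int) (m : Int) :
    lowest_vals_loop ts acc (some m) =
      (if pvFoldMin m ts = m then acc else []) ++
      (ts.filter (fun t => t.2 = pvFoldMin m ts)).map Prod.fst := by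
  induction ts generalizing acc m with
  | nil => simp [lowest_vals_loop, pvFoldMin]
  | cons t rest ih =>
    have hFm : pvFoldMin m (t :: rest) = pvFoldMin (min m t.2) rest := rfl
    by_cases h1 : t.2 < m
    · have hmin : min m t.2 = t.2 := min_eq_right h1.le
      have hle : pvFoldMin t.2 rest ≤ t.2 := pvFoldMin_le _ _
      have hne : pvFoldMin m (t :: rest) ≠ m := by
        rw [hFm, hmin]; exact fun he => absurd (he ▸ hle) (not_le.mpr h1)
      simp only [lowest_vals_loop, if_pos h1, ih]
      rw [if_neg hne]
      by_cases h2 : pvFoldMin t.2 rest = t.2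
      · simp [hFm, hmin, h2]
      · have hne2 : ¬ (t.2 = pvFoldMin t.2 rest) := fun he => h2 he.symm
        simp [hFm, hmin, h2, hne2]
    · by_cases h2 : t.2 = m
      · have hmin : min m t.2 = m := by simp [h2]
        simp only [lowest_vals_loop, if_neg h1, if_pos h2, ih]
        rw [hFm, hmin]
        by_cases h3 : pvFoldMin m rest = m
        · simp [h3, h2, List.append_assoc]
        · have : ¬ (t.2 = pvFoldMin m rest) := fun he => h3 (by
            have := pvFoldMin_le m rest
            omega)
          simp [h3, this]
      · have hlt : m < t.2 := lt_of_le_of_ne (not_lt.mp h1) (fun he => h2 he.symm)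
        have hmin : min m t.2 = m := min_eq_left hlt.le
        simp only [lowest_vals_loop, if_neg h1, if_neg h2, ih]
        rw [hFm, hmin]
        have : ¬ (t.2 = pvFoldMin m rest) := fun he => by
          have := pvFoldMin_le m rest; omega
        simp [this]

-- ===== VERDICT (by name: the statement is the Claim_ definition above) =====
theorem lowest_vals_spec : Claim_equal_lowest_vals := by
  intro tuples _
  unfold Spec_lowest_vals
  match tuples with
  | [] => rfl
  | t :: rest =>
    have hA : lowest_vals (t :: rest) = lowest_vals_loop rest [t.1] (some t.2) := rfl
    rw [hA, lowest_vals_loop_char]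
    have hmin : PySem.List.min? ((t :: rest).map Prod.snd) (fun x => x)
        = some (pvFoldMin t.2 rest) := by
      rw [List.map_cons, PySem.List.min?_id_cons]
      congr 1
      simp [pvFoldMin, List.foldl_map]
    simp only [lowest_vals_alt, hmin]
    have hle : pvFoldMin t.2 rest ≤ t.2 := pvFoldMin_le _ _
    by_cases h : pvFoldMin t.2 rest = t.2
    · simp [h]
    · have : ¬ (t.2 = pvFoldMin t.2 rest) := fun he => h he.symm
      simp [h, this]
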